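-- pv_equiv track=rewrite | github.com/realZillionX/Inspire-cli | inspire/bridge/tunnel/ssh.py | _split_ssh_config_blocks
-- ===== SOURCE A (Python) =====
-- def _split_ssh_config_blocks(content: str) -> list[tuple[str, str]]:
--     """Split SSH config into ordered raw and Host blocks."""
--     if not content:
--         return []
--
--     lines = content.splitlines(keepends=True)
--     blocks: list[tuple[str, str]] = []
--     index = 0
--     while index < len(lines):
--         if lines[index].startswith("Host "):
--             end = index + 1
--             while end < len(lines) and not lines[end].startswith("Host "):
--                 end += 1
--             blocks.append(("host", "".join(lines[index:end])))
--             index = end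
--             continue
--         end = index + 1
--         while end < len(lines) and not lines[end].startswith("Host "):
--             end += 1
--         blocks.append(("raw", "".join(lines[index:end])))
--         index = end
--     return blocks
-- ===== SOURCE B (Python) =====
-- def _split_ssh_config_blocks(content: str) -> list[tuple[str, str]]:
--     """Split SSH config into ordered raw and Host blocks (accumulate-and-flush)."""
--     def flush(buf):
--         return ("host" if buf[0].startswith("Host ") else "raw", "".join(buf))
--
--     blocks: list[tuple[str, str]] = []
--     cur: list[str] = []
--     for line in content.splitlines(keepends=True):
--         if line.startswith("Host ") and cur:
--             blocks.append(flush(cur))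
--             cur = []
--         cur.append(line)
--     if cur:
--         blocks.append(flush(cur))
--     return blocks
-- ===== Notes on version B (the rewrite author's own statement) =====
-- stated objective: simpler
-- what changed: Replaced A's two-pointer index/lookahead-while scan (with its duplicated host/raw branch and slicing by indices) by a single accumulate-and-flush pass over the lines with a buffer that is flushed at each 'Host ' boundary and once at the end.
import Mathlib
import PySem

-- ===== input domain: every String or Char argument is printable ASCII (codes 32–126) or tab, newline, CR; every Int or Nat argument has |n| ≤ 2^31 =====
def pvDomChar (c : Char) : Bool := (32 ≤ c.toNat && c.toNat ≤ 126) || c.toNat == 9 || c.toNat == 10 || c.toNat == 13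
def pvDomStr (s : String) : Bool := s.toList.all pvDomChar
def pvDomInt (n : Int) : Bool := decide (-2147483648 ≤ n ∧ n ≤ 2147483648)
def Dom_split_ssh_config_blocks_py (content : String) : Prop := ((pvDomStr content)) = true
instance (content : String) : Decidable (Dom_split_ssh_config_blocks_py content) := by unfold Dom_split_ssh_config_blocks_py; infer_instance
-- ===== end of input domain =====

-- B replaces A's two-pointer lookahead scan by an accumulate-and-flush pass; same O(n) cost, shorter code.

-- Hand port of str.splitlines(keepends=True), exact on the domain (the only line
-- terminators among printable ASCII + tab/newline/CR are '\n', '\r' and '\r\n').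
-- Shared by both ports, as both Pythons call the same built-in.
def pvSplitKeepAux (cur : List Char) : List Char → List (List Char)
  | [] => if cur.isEmpty then [] else [cur.reverse]
  | '\r' :: '\n' :: rest => (cur.reverse ++ ['\r', '\n']) :: pvSplitKeepAux [] rest
  | '\r' :: rest => (cur.reverse ++ ['\r']) :: pvSplitKeepAux [] rest
  | '\n' :: rest => (cur.reverse ++ ['\n']) :: pvSplitKeepAux [] rest
  | c :: rest => pvSplitKeepAux (c :: cur) rest

def pvSplitKeep (cs : List Char) : List (List Char) := pvSplitKeepAux [] cs

-- "Host " as a list of code points (shared constant).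
def pvHost : List Char := "Host ".toList

-- ===== PORT A =====
-- inner while loop of A: advance end while end < len(lines) and not lines[end].startswith("Host ").
-- Structural recursion on a fuel bound (len(lines), enough for the whole scan): a totality guard only.
def pvFindEnd (lines : List (List Char)) : Nat → Nat → Nat
  | 0, e => e
  | fuel + 1, e =>
    if h : e < lines.length then
      if PySem.Chars.startswith lines[e] pvHost then e else pvFindEnd lines fuel (e + 1)
    else e

-- outer while loop of A ("".join(lines[index:end]) ported as String.ofList of the flatten,
-- lines[index:end] as (drop index).take (end-index): exact for 0 ≤ index ≤ end; fuel is a totality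
-- guard again — the loop advances index by at least one line per iteration)
def pvALoop (lines : List (List Char)) : Nat → Nat → List (String × String)
  | 0, _ => []
  | fuel + 1, index =>
    if h : index < lines.length then
      if PySem.Chars.startswith lines[index] pvHost then
        let e := pvFindEnd lines lines.length (index + 1)
        ("host", String.ofList ((lines.drop index).take (e - index)).flatten) :: pvALoop lines fuel e
      else
        let e := pvFindEnd lines lines.length (index + 1)
        ("raw", String.ofList ((lines.drop index).take (e - index)).flatten) :: pvALoop lines fuel e
    else []

def split_ssh_config_blocks_py (content : String) : List (String × String) :=
  if content = "" then []
  else pvALoop (pvSplitKeep content.toList) (pvSplitKeep content.toList).length 0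

-- ===== PORT B =====
def pvFlush (buf : List (List Char)) : String × String :=
  ((if PySem.Chars.startswith buf.headI pvHost then "host" else "raw"), String.ofList buf.flatten)

def pvStep (st : List (String × String) × List (List Char)) (line : List Char) :
    List (String × String) × List (List Char) :=
  if PySem.Chars.startswith line pvHost && !st.2.isEmpty then
    (st.1 ++ [pvFlush st.2], [line])
  else
    (st.1, st.2 ++ [line])

def split_ssh_config_blocks_py_alt (content : String) : List (String × String) :=
  let st := (pvSplitKeep content.toList).foldl pvStep ([], [])
  if st.2.isEmpty then st.1 else st.1 ++ [pvFlush st.2]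

-- ===== PRECONDITION & SPEC =====
def Spec_split_ssh_config_blocks_py (content : String) (out : List (String × String)) : Prop := out = split_ssh_config_blocks_py_alt content
instance (content : String) (out : List (String × String)) : Decidable (Spec_split_ssh_config_blocks_py content out) := by unfold Spec_split_ssh_config_blocks_py; infer_instance

-- ===== CLAIM (what is proved, stated in full; the proofs are below) =====
def Claim_equal_split_ssh_config_blocks_py : Prop := ∀ (content : String), Dom_split_ssh_config_blocks_py content → Spec_split_ssh_config_blocks_py content (split_ssh_config_blocks_py content)

-- ===== LEMMAS AND PROOFS =====

-- canonical grouping both ports are proved equal to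
def pvSpec : List (List Char) → List (String × String)
  | [] => []
  | l :: rest =>
    pvFlush (l :: rest.takeWhile (fun x => !PySem.Chars.startswith x pvHost)) ::
      pvSpec (rest.dropWhile (fun x => !PySem.Chars.startswith x pvHost))
termination_by ls => ls.length
decreasing_by
  have := List.length_dropWhile_le (fun x => !PySem.Chars.startswith x pvHost) rest
  simpa using Nat.lt_succ_of_le this

theorem pvFindEnd_ge (lines : List (List Char)) :
    ∀ (fuel e : Nat), e ≤ pvFindEnd lines fuel e := by
  intro fuel
  induction fuel with
  | zero => intro e; exact le_refl e
  | succ fuel ih =>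
    intro e
    rw [pvFindEnd]
    split
    · split
      · exact le_refl e
      · exact le_trans (Nat.le_succ e) (ih (e + 1))
    · exact le_refl e

theorem pvFindEnd_eq (lines : List (List Char)) :
    ∀ (fuel e : Nat), lines.length - e ≤ fuel →
      pvFindEnd lines fuel e =
        e + ((lines.drop e).takeWhile (fun x => !PySem.Chars.startswith x pvHost)).length := by
  intro fuel
  induction fuel with
  | zero =>
    intro e he
    have : lines.drop e = [] := List.drop_eq_nil_of_le (by omega)
    rw [pvFindEnd, this]
    simp
  | succ fuel ih =>
    intro e he
    rw [pvFindEnd]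
    split
    · rename_i h
      have hd : lines.drop e = lines[e] :: lines.drop (e + 1) :=
        List.drop_eq_getElem_cons h
      split
      · rename_i hh
        rw [hd, List.takeWhile_cons]
        simp [hh]
      · rename_i hh
        have heq := ih (e + 1) (by omega)
        rw [heq, hd, List.takeWhile_cons]
        have hh' : PySem.Chars.startswith lines[e] pvHost = false := by
          cases hx : PySem.Chars.startswith lines[e] pvHost
          · rfl
          · exact absurd hx hh
        simp only [hh', Bool.not_false, if_pos, List.length_cons]
        omega
    · rename_i h
      have : lines.drop e = [] := List.drop_eq_nil_of_le (by omega)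
      simp [this]

theorem pvALoop_eq (lines : List (List Char)) :
    ∀ (fuel index : Nat), lines.length - index ≤ fuel →
      pvALoop lines fuel index = pvSpec (lines.drop index) := by
  intro fuel
  induction fuel with
  | zero =>
    intro index hn
    have h : lines.length ≤ index := by omega
    have hnil : lines.drop index = [] := List.drop_eq_nil_of_le h
    rw [pvALoop]
    simp [hnil, pvSpec]
  | succ n ih =>
    intro index hn
    rw [pvALoop]
    by_cases h : index < lines.length
    · have hd : lines.drop index = lines[index] :: lines.drop (index + 1) :=
        List.drop_eq_getElem_cons h
      have hfe := pvFindEnd_eq lines lines.length (index + 1) (by omega)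
      have hge := pvFindEnd_ge lines lines.length (index + 1)
      have hsub : pvFindEnd lines lines.length (index + 1) - index =
          ((lines.drop (index + 1)).takeWhile (fun x => !PySem.Chars.startswith x pvHost)).length + 1 := by
        rw [hfe]; omega
      have htake : (lines.drop (index + 1)).take
          ((lines.drop (index + 1)).takeWhile (fun x => !PySem.Chars.startswith x pvHost)).length =
          (lines.drop (index + 1)).takeWhile (fun x => !PySem.Chars.startswith x pvHost) :=
        (List.prefix_iff_eq_take.mp (List.takeWhile_prefix _)).symm
      have hlen : ((lines.drop (index + 1)).takeWhile (fun x => !PySem.Chars.startswith x pvHost)).length +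
          ((lines.drop (index + 1)).dropWhile (fun x => !PySem.Chars.startswith x pvHost)).length =
          (lines.drop (index + 1)).length := by
        conv_rhs => rw [← List.takeWhile_append_dropWhile
          (p := fun x => !PySem.Chars.startswith x pvHost) (l := lines.drop (index + 1))]
        rw [List.length_append]
      have hdropend : lines.drop (pvFindEnd lines lines.length (index + 1)) =
          (lines.drop (index + 1)).dropWhile (fun x => !PySem.Chars.startswith x pvHost) := by
        rw [hfe]
        have h2 : lines.drop (index + 1 +
            ((lines.drop (index + 1)).takeWhile (fun x => !PySem.Chars.startswith x pvHost)).length) =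
            (lines.drop (index + 1)).drop
              ((lines.drop (index + 1)).takeWhile (fun x => !PySem.Chars.startswith x pvHost)).length := by
          rw [List.drop_drop]
        rw [h2]
        have h3 := List.suffix_iff_eq_drop.mp
          (List.dropWhile_suffix (l := lines.drop (index + 1))
            (p := fun x => !PySem.Chars.startswith x pvHost))
        rw [show ((lines.drop (index + 1)).takeWhile (fun x => !PySem.Chars.startswith x pvHost)).length =
            (lines.drop (index + 1)).length -
              ((lines.drop (index + 1)).dropWhile (fun x => !PySem.Chars.startswith x pvHost)).length from by omega,
          ← h3]
      have hrec : pvALoop lines n (pvFindEnd lines lines.length (index + 1)) =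
          pvSpec (lines.drop (pvFindEnd lines lines.length (index + 1))) := by
        apply ih; omega
      rw [hd, pvSpec]
      simp only [dif_pos h]
      by_cases hh : PySem.Chars.startswith lines[index] pvHost
      · simp only [if_pos hh]
        rw [hrec, hdropend, hsub, List.take_succ_cons, htake, pvFlush]
        simp [hh]
      · simp only [if_neg hh]
        rw [hrec, hdropend, hsub, List.take_succ_cons, htake, pvFlush]
        simp [hh]
    · have hnil : lines.drop index = [] := List.drop_eq_nil_of_le (by omega)
      simp [h, hnil, pvSpec]

-- B-side invariant: what the fold produces from an arbitrary state
def pvSpecC (cur : List (List Char)) (lines : List (List Char)) : List (String × String) :=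
  if cur.isEmpty then pvSpec lines
  else
    pvFlush (cur ++ lines.takeWhile (fun x => !PySem.Chars.startswith x pvHost)) ::
      pvSpec (lines.dropWhile (fun x => !PySem.Chars.startswith x pvHost))

def pvFinish (st : List (String × String) × List (List Char)) : List (String × String) :=
  if st.2.isEmpty then st.1 else st.1 ++ [pvFlush st.2]

theorem pvFold_inv (lines : List (List Char)) :
    ∀ (blocks : List (String × String)) (cur : List (List Char)),
      pvFinish (lines.foldl pvStep (blocks, cur)) = blocks ++ pvSpecC cur lines := by
  induction lines with
  | nil =>
    intro blocks cur
    by_cases hc : cur.isEmpty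
    · simp [pvFinish, pvSpecC, hc, pvSpec]
    · simp [pvFinish, pvSpecC, hc, pvSpec]
  | cons l ls ih =>
    intro blocks cur
    rw [List.foldl_cons]
    by_cases hcond : (PySem.Chars.startswith l pvHost && !cur.isEmpty) = true
    · have hh : PySem.Chars.startswith l pvHost = true := by
        simpa using (Bool.and_elim_left hcond)
      have hc : cur.isEmpty = false := by
        by_contra hne
        have h2 : cur.isEmpty = true := by simpa using hne
        simp [h2] at hcond
      rw [show pvStep (blocks, cur) l = (blocks ++ [pvFlush cur], [l]) by
        simp [pvStep, hcond]]
      rw [ih]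
      simp only [pvSpecC, hc, List.isEmpty_cons, List.takeWhile_cons, hh]
      simp [pvSpec, List.append_assoc, hh]
    · rw [show pvStep (blocks, cur) l = (blocks, cur ++ [l]) by simp [pvStep, hcond]]
      rw [ih]
      congr 1
      by_cases hc : cur.isEmpty
      · have : cur = [] := List.isEmpty_iff.mp hc
        subst this
        simp [pvSpecC, pvSpec]
      · have hc' : cur.isEmpty = false := by simpa using hc
        have hh : PySem.Chars.startswith l pvHost = false := by
          cases h : PySem.Chars.startswith l pvHost
          · rfl
          · simp [h, hc'] at hcond
        simp [pvSpecC, hc', hh]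
  -- end

theorem pvAlt_eq (content : String) :
    split_ssh_config_blocks_py_alt content = pvSpec (pvSplitKeep content.toList) := by
  unfold split_ssh_config_blocks_py_alt
  have h := pvFold_inv (pvSplitKeep content.toList) [] []
  simp only [pvFinish] at h
  simpa [pvSpecC] using h

-- ===== VERDICT (by name: the statement is the Claim_ definition above) =====
theorem split_ssh_config_blocks_py_spec : Claim_equal_split_ssh_config_blocks_py := by
  intro content _
  unfold Spec_split_ssh_config_blocks_py split_ssh_config_blocks_py
  rw [pvAlt_eq]
  by_cases h : content = ""
  · subst h
    simp [pvSplitKeep, pvSplitKeepAux, pvSpec]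
  · simp only [if_neg h]
    exact (pvALoop_eq (pvSplitKeep content.toList) (pvSplitKeep content.toList).length 0 (by omega)).trans (by rw [List.drop_zero])
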